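-- pv_equiv track=rewrite | github.com/Hardes1/MineSweeper | main.py | can_open_any
-- ===== SOURCE A (Python) =====
-- def can_open_any(field):
--     """Функция проверки того, что ещё можно открыть хотя бы одно поле, если на предыдущем шаге была открыта мина
--     вернёт 0."""
--     for i in range(len(field)):
--         for j in range(len(field[i])):
--             if field[i][j] == '*':
--                 return 0
--     for i in range(len(field)):
--         for j in range(len(field[i])):
--             if field[i][j] == '#':
--                 return 2
--     return 1
-- ===== SOURCE B (Python) =====
-- def can_open_any(field):
--     saw_hash = False
--     for row in field:
--         for cell in row:
--             if cell == '*':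
--                 return 0
--             if cell == '#':
--                 saw_hash = True
--     return 2 if saw_hash else 1
-- ===== Notes on version B (the rewrite author's own statement) =====
-- stated objective: simpler
-- what changed: B replaces A's two separate full grid scans (one for '*', then one for '#') with a single pass maintaining a saw_hash flag, returning 0 immediately on '*' and deciding 2 vs 1 from the flag after the loop.
import Mathlib
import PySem

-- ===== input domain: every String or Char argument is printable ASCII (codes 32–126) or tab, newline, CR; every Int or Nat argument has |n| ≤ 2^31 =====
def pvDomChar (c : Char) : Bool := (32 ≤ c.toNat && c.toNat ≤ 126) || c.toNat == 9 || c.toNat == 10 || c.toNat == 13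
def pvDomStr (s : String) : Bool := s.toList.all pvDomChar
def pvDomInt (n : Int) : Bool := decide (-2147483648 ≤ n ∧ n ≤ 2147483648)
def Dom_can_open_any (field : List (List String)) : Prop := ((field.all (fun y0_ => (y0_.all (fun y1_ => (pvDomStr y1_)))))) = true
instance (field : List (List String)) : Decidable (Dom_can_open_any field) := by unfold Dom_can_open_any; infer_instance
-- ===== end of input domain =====

-- B merges A's two separate full grid scans into a single pass carrying a saw_hash flag (objective: simpler).

-- ===== PORT A =====
-- A: first full scan for '*' (early return 0), then second full scan for '#' (return 2), else 1.
def can_open_any (field : List (List String)) : Int :=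
  if field.any (fun row => row.any (fun c => c = "*")) then 0
  else if field.any (fun row => row.any (fun c => c = "#")) then 2
  else 1

-- ===== PORT B =====
-- inner loop over a row: none = '*' found (return 0), some saw = updated saw_hash flag
def altRowLoop (row : List String) (saw : Bool) : Option Bool :=
  match row with
  | [] => some saw
  | c :: cs =>
    if c = "*" then none
    else altRowLoop cs (if c = "#" then true else saw)

def altLoop (rows : List (List String)) (saw : Bool) : Int :=
  match rows with
  | [] => if saw then 2 else 1
  | r :: rs =>
    match altRowLoop r saw with
    | none => 0
    | some saw' => altLoop rs saw'

def can_open_any_alt (field : List (List String)) : Int :=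
  altLoop field false

-- ===== PRECONDITION & SPEC =====
def Spec_can_open_any (field : List (List String)) (out : Int) : Prop := out = can_open_any_alt field
instance (field : List (List String)) (out : Int) : Decidable (Spec_can_open_any field out) := by unfold Spec_can_open_any; infer_instance

-- ===== CLAIM (what is proved, stated in full; the proofs are below) =====
def Claim_equal_can_open_any : Prop := ∀ (field : List (List String)), Dom_can_open_any field → Spec_can_open_any field (can_open_any field)

-- ===== LEMMAS AND PROOFS =====
theorem altRowLoop_none_iff (row : List String) (saw : Bool) :
    altRowLoop row saw = none ↔ row.any (fun c => c = "*") := by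
  induction row generalizing saw with
  | nil => simp [altRowLoop]
  | cons c cs ih =>
    simp only [altRowLoop, List.any_cons]
    by_cases h : c = "*" <;> simp [h, ih]

theorem altRowLoop_some (row : List String) (saw : Bool)
    (h : ¬ row.any (fun c => c = "*")) :
    altRowLoop row saw = some (saw || row.any (fun c => c = "#")) := by
  induction row generalizing saw with
  | nil => simp [altRowLoop]
  | cons c cs ih =>
    simp only [List.any_cons, decide_eq_true_eq, Bool.or_eq_true, not_or] at h
    simp only [altRowLoop, if_neg h.1, List.any_cons]
    rw [ih _ (by simp [h.2])]
    by_cases hc : c = "#" <;> simp [hc]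

theorem altLoop_eq (rows : List (List String)) (saw : Bool) :
    altLoop rows saw =
      if rows.any (fun row => row.any (fun c => c = "*")) then 0
      else if saw || rows.any (fun row => row.any (fun c => c = "#")) then 2
      else 1 := by
  induction rows generalizing saw with
  | nil => simp [altLoop]
  | cons r rs ih =>
    simp only [altLoop, List.any_cons]
    by_cases hs : r.any (fun c => c = "*")
    · rw [(altRowLoop_none_iff r saw).mpr hs]
      simp [hs]
    · rw [altRowLoop_some r saw hs]
      dsimp only
      rw [ih]
      simp [hs, Bool.or_assoc]

-- ===== VERDICT (by name: the statement is the Claim_ definition above) =====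
theorem can_open_any_spec : Claim_equal_can_open_any := by
  intro field _
  show can_open_any field = can_open_any_alt field
  rw [can_open_any_alt, altLoop_eq, can_open_any]
  simp
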